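-- pv_equiv track=rewrite | github.com/ijnim1121/BaekjoonHub | 백준/Bronze/1453. 피시방 알바/피시방 알바.py | refuse
-- ===== SOURCE A (Python) =====
-- def refuse(seat):
--     reserved_seats = set() #set은 중복된 값을 허용하지 않으므로 같은 좌석 번호가 여러번 추가되는 것을 막을 수 있음
--     count = 0
--     # for i in range(N-1):
--     #     if seat[i] == seat[i+1]:
--     #         count += 1
--     for s in seat:
--         if s in reserved_seats:
--             count += 1  # 중복 예약이 발생한 경우
--         else:
--             reserved_seats.add(s) #예약된 좌석에 추가
--
--     return count
-- ===== SOURCE B (Python) =====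
-- def refuse(seat):
--     t = sorted(seat)
--     return sum(a == b for a, b in zip(t, t[1:]))
-- ===== Notes on version B (the rewrite author's own statement) =====
-- stated objective: alternative
-- what changed: Replaced the hash-set membership loop with a sort-then-scan: sort the seats and count adjacent equal pairs, which equals the number of duplicate reservations.
import Mathlib
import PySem

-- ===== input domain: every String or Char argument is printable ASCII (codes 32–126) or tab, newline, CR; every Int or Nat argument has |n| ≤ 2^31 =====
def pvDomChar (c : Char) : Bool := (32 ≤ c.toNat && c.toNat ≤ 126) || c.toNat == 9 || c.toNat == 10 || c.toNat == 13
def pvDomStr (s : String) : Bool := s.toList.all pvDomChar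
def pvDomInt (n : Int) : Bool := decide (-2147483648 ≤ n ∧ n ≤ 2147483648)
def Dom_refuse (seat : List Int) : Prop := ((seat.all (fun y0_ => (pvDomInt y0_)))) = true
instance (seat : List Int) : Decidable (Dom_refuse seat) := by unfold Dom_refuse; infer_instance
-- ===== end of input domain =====

-- B replaces A's hash-set membership loop by sort-then-scan: sort the seats and count adjacent equal pairs (alternative algorithm, same result).

-- ===== PORT A =====
def refuse (seat : List Int) : Int :=
  (seat.foldl
    (fun st s =>
      if PySem.Set.contains st.1 s then (st.1, st.2 + 1)
      else (PySem.Set.add st.1 s, st.2))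
    ((PySem.Set.empty : PySem.Set Int), (0 : Int))).2

-- ===== PORT B =====
-- t = sorted(seat); sum(a == b for a, b in zip(t, t[1:]))
def refuse_alt (seat : List Int) : Int :=
  let t := PySem.List.sorted seat (fun x => x) false
  (t.zip (PySem.List.slice t (some 1) none)).foldl
    (fun acc p => acc + (if p.1 == p.2 then 1 else 0)) 0

-- ===== PRECONDITION & SPEC =====
def Spec_refuse (seat : List Int) (out : Int) : Prop := out = refuse_alt seat
instance (seat : List Int) (out : Int) : Decidable (Spec_refuse seat out) := by unfold Spec_refuse; infer_instance

-- ===== CLAIM (what is proved, stated in full; the proofs are below) =====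
def Claim_equal_refuse : Prop := ∀ (seat : List Int), Dom_refuse seat → Spec_refuse seat (refuse seat)

-- ===== LEMMAS AND PROOFS =====

-- A's loop result: count = length − (growth of the reserved set).
theorem refuse_loop_count (seat : List Int) :
    ∀ (s : PySem.Set Int) (c : Int),
      (seat.foldl
        (fun st x =>
          if PySem.Set.contains st.1 x then (st.1, st.2 + 1)
          else (PySem.Set.add st.1 x, st.2))
        (s, c)).2
      = c + (seat.length : Int) - (((PySem.Set.update s seat).length : Int) - (s.length : Int)) := by
  induction seat with
  | nil => intro s c; simp [PySem.Set.update]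
  | cons x xs ih =>
    intro s c
    simp only [List.foldl_cons, PySem.Set.update, List.length_cons]
    by_cases h : PySem.Set.contains s x = true
    · have hx : x ∈ s := by simpa [PySem.Set.contains] using h
      have hadd : PySem.Set.add s x = s := by simp [PySem.Set.add, hx]
      simp only [h, if_pos, hadd]
      have := ih s (c + 1)
      simp only [PySem.Set.update] at this
      rw [this]; push_cast; ring
    · simp only [eq_false_intro h, if_false]
      have hx : x ∉ s := by simpa [PySem.Set.contains] using h
      have := ih (PySem.Set.add s x) c
      simp only [PySem.Set.update] at this
      rw [this]
      have hlen : (PySem.Set.add s x).length = s.length + 1 := by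
        simp [PySem.Set.add, hx]
      rw [hlen]; push_cast; ring

-- B's fold is a count of adjacent equal pairs.
theorem foldl_indicator_count (l : List (Int × Int)) :
    ∀ (acc : Int),
      l.foldl (fun acc p => acc + (if p.1 == p.2 then 1 else 0)) acc
        = acc + (l.countP (fun p => p.1 == p.2) : Int) := by
  induction l with
  | nil => intro acc; simp
  | cons p l ih =>
    intro acc
    simp only [List.foldl_cons, List.countP_cons]
    rw [ih]
    by_cases h : p.1 = p.2 <;> simp [h] <;> ring

-- In a (≤)-sorted list, adjacent-equal pairs + distinct elements = length.
theorem sorted_adj_count (t : List Int) (h : t.Pairwise (· ≤ ·)) :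
    (t.zip t.tail).countP (fun p => p.1 == p.2) + t.toFinset.card = t.length := by
  induction t with
  | nil => simp
  | cons x xs ih =>
    have hxs : xs.Pairwise (· ≤ ·) := (List.pairwise_cons.mp h).2
    have hle : ∀ z ∈ xs, x ≤ z := (List.pairwise_cons.mp h).1
    cases xs with
    | nil => simp
    | cons y ys =>
      have hzip : ((x :: y :: ys).zip (x :: y :: ys).tail)
          = (x, y) :: ((y :: ys).zip (y :: ys).tail) := by simp
      rw [hzip, List.countP_cons]
      by_cases hxy : x = y
      · subst hxy
        have := ih hxs
        simp only [List.toFinset_cons, Finset.insert_idem, beq_self_eq_true, if_true,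
          List.length_cons] at this ⊢
        omega
      · have hnot : x ∉ y :: ys := by
          intro hx
          rcases List.mem_cons.mp hx with h1 | h2
          · exact hxy h1
          · have h3 : y ≤ x := (List.pairwise_cons.mp hxs).1 x h2
            have h4 : x ≤ y := hle y (List.mem_cons_self)
            exact hxy (le_antisymm h4 h3)
        have hins : (x :: y :: ys).toFinset.card = (y :: ys).toFinset.card + 1 := by
          rw [List.toFinset_cons,
            Finset.card_insert_of_notMem (fun hc => hnot (List.mem_toFinset.mp hc))]
        have := ih hxs
        have hne : ((x, y).1 == (x, y).2) = false := by simp [hxy]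
        rw [hins]
        simp only [hne, Bool.false_eq_true, if_false, List.length_cons] at this ⊢
        omega

-- set(seat) has as many elements as seat has distinct values.
theorem ofList_length_card (seat : List Int) :
    (PySem.Set.ofList seat).length = seat.toFinset.card := by
  have hnd : (PySem.Set.ofList seat).Nodup := PySem.Set.nodup_ofList seat
  have hfs : (PySem.Set.ofList seat).toFinset = seat.toFinset := by
    apply Finset.ext
    intro a
    simp [PySem.Set.mem_ofList]
  calc (PySem.Set.ofList seat).length
      = (PySem.Set.ofList seat).toFinset.card := (List.toFinset_card_of_nodup hnd).symm
    _ = seat.toFinset.card := by rw [hfs]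

-- B's port, reduced to the adjacent-equal count on the sorted list.
theorem refuse_alt_eq (seat : List Int) :
    refuse_alt seat
      = (((PySem.List.sorted seat (fun x => x) false).zip
            (PySem.List.sorted seat (fun x => x) false).tail).countP
          (fun p => p.1 == p.2) : Int) := by
  simp only [refuse_alt, PySem.List.slice_from_one]
  rw [foldl_indicator_count]
  simp

-- ===== VERDICT (by name: the statement is the Claim_ definition above) =====
theorem refuse_spec : Claim_equal_refuse := by
  intro seat _
  unfold Spec_refuse refuse
  rw [refuse_loop_count seat PySem.Set.empty 0, refuse_alt_eq]
  set t := PySem.List.sorted seat (fun x => x) false with ht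
  have hperm : t.Perm seat := PySem.List.sorted_perm seat (fun x => x) false
  have hpw : t.Pairwise (· ≤ ·) := by
    simpa using PySem.List.sorted_pairwise seat (fun x => x)
  have hadj := sorted_adj_count t hpw
  have hlen : t.length = seat.length := hperm.length_eq
  have hfin : t.toFinset = seat.toFinset := List.toFinset_eq_of_perm _ _ hperm
  have hup : PySem.Set.update (PySem.Set.empty : PySem.Set Int) seat
      = PySem.Set.ofList seat := by
    rw [PySem.Set.ofList_eq_foldl]; rfl
  have hcard := ofList_length_card seat
  rw [hup, hcard]
  rw [hlen, hfin] at hadj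
  simp only [PySem.Set.empty, List.length_nil]
  omega
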